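-- pv_equiv track=rewrite | github.com/weichuntsai0217/work-note | epi-python/ch19/19_3_COMPUTE_ENCLOSED_REGIONS.py | paint_enclosed_whites_to_blacks
-- ===== SOURCE A (Python) =====
-- def get_boundary_whites(board):
--   if len(board) == 0: return []
--   last_row = len(board) - 1
--   last_col = len(board[0]) - 1
--   boundary_ws = []
--
--   for col, item in enumerate(board[0]):
--     if item == 'W': boundary_ws.append([0, col])
--
--   for row, item in enumerate(board):
--     if item[last_col] == 'W': boundary_ws.append([row, last_col])
--
--   for col, item in enumerate(board[last_row]):
--     if item == 'W': boundary_ws.append([last_row, col])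
--
--   for row, item in enumerate(board):
--     if item[0] == 'W': boundary_ws.append([row, 0])
--
--   return boundary_ws
--
-- def get_init_visited(board):
--   tot_rows = len(board)
--   tot_cols = len(board[0])
--   visited = []
--   for i in range(tot_rows):
--     visited.append([])
--     for j in range(tot_cols):
--       visited[i].append(False)
--   # be careful:
--   # return [[False]*tot_cols]*tot_rows would cause "reference to self" problem!!!!!!!!!!!
--   return visited
--
-- def is_valid_white(node, tot_rows, tot_cols, board, visited):
--   row = node[0]
--   col = node[1]
--   if row < 0 or row >= tot_rows: return False
--   if col < 0 or col >= tot_cols: return False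
--   if board[row][col] != 'W': return False
--   if visited[row][col]: return False
--   return True
--
-- def bfs(board, start, visited):
--   tot_rows = len(board)
--   tot_cols = len(board[0])
--   queue = []
--   dpos = [[-1, 0], [0, 1], [1, 0], [0, -1]]
--   row = start[0]
--   col = start[1]
--   if visited[row][col]: return
--   visited[row][col] = True
--   queue.append(start)
--   while queue:
--     center = queue[0]
--     for p in dpos:
--       node = [center[0]+p[0], center[1]+p[1]]
--       if is_valid_white(node, tot_rows, tot_cols, board, visited):
--         visited[node[0]][node[1]] = True
--         queue.append(node)
--     queue.pop(0)
--
-- def paint_enclosed_whites_to_blacks(board):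
--   bws = get_boundary_whites(board)
--   visited = get_init_visited(board)
--   for item in bws:
--     bfs(board, item, visited)
--
--   for i, row_item in enumerate(board):
--     for j, col_item in enumerate(row_item):
--       if col_item == 'W' and not visited[i][j]:
--         board[i][j] = 'B'
--   return board
-- ===== SOURCE B (Python) =====
-- def paint_enclosed_whites_to_blacks(board):
--   rows = len(board)
--   cols = len(board[0])
--   parent = list(range(rows * cols))
--
--   def find(k):
--     while parent[k] != k:
--       k = parent[k]
--     return k
--
--   def union(a, b):
--     ra, rb = find(a), find(b)
--     if ra < rb:
--       parent[ra] = rb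
--     elif rb < ra:
--       parent[rb] = ra
--
--   for i in range(rows):
--     for j in range(cols):
--       if board[i][j] == 'W':
--         if i + 1 < rows and board[i + 1][j] == 'W':
--           union(i * cols + j, (i + 1) * cols + j)
--         if j + 1 < cols and board[i][j + 1] == 'W':
--           union(i * cols + j, i * cols + j + 1)
--
--   boundary_roots = {find(i * cols + j)
--                     for i in range(rows) for j in range(cols)
--                     if board[i][j] == 'W'
--                     and (i == 0 or i == rows - 1 or j == 0 or j == cols - 1)}
--
--   for i in range(rows):
--     for j in range(cols):
--       if board[i][j] == 'W' and find(i * cols + j) not in boundary_roots: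
--         board[i][j] = 'B'
--   return board
-- ===== Notes on version B (the rewrite author's own statement) =====
-- stated objective: alternative
-- what changed: Replaces A's boundary collection plus per-seed BFS with a queue and a visited matrix by a union-find (disjoint-set forest, union by larger index): one scan unions each white cell with its right and down white neighbours, the find-roots of boundary whites are collected in a set, and one final pass paints every white whose root is not a boundary root; both mutate the board in place.
import Mathlib
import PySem

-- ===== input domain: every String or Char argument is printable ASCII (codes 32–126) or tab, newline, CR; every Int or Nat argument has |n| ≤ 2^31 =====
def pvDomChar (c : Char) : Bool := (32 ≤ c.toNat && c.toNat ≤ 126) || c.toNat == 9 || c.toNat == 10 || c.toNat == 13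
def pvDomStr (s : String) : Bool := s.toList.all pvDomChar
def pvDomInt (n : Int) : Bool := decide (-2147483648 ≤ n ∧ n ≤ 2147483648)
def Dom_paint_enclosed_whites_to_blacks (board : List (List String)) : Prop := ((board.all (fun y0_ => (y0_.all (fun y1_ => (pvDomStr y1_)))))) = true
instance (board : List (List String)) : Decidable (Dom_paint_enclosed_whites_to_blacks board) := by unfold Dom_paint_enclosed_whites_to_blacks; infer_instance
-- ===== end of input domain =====

-- B replaces A's boundary collection + per-seed BFS (queue, visited matrix) by a union-find
-- (disjoint-set forest, union by larger index) over cell ids: union right/down white neighbours,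
-- collect the roots of boundary whites, repaint whites with a non-boundary root; the equivalence
-- is about the return value (both Pythons mutate the board in place the same way).

-- ===== PORT A =====
-- cell access board[i][j] / visited[i][j]: Python list indexing; exact on Pre_ (all accesses
-- are bounds-guarded there, so the .getD default is never the result of an out-of-range read)
def pvCell (board : List (List String)) (i j : Int) : String :=
  (PySem.List.pyGet? ((PySem.List.pyGet? board i).getD []) j).getD ""

def pvVget (visited : List (List Bool)) (i j : Int) : Bool :=
  (PySem.List.pyGet? ((PySem.List.pyGet? visited i).getD []) j).getD false

-- visited[i][j] = True; only reached with 0 ≤ i, 0 ≤ j in A (guards in is_valid_white / bws coords)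
def pvVset (visited : List (List Bool)) (i j : Int) : List (List Bool) :=
  visited.set i.toNat ((visited[i.toNat]?.getD []).set j.toNat true)

def get_boundary_whites (board : List (List String)) : List (Int × Int) :=
  if board.length = 0 then []
  else
    let lastRow : Int := (board.length : Int) - 1
    let lastCol : Int := ((board.headD []).length : Int) - 1
    let l1 := (PySem.List.enumerate (board.headD [])).filterMap
      (fun ci => if ci.2 = "W" then some ((0 : Int), ci.1) else none)
    let l2 := (PySem.List.enumerate board).filterMap
      (fun ri => if (PySem.List.pyGet? ri.2 lastCol).getD "" = "W" then some (ri.1, lastCol) else none)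
    let l3 := (PySem.List.enumerate ((PySem.List.pyGet? board lastRow).getD [])).filterMap
      (fun ci => if ci.2 = "W" then some (lastRow, ci.1) else none)
    let l4 := (PySem.List.enumerate board).filterMap
      (fun ri => if (PySem.List.pyGet? ri.2 0).getD "" = "W" then some (ri.1, (0 : Int)) else none)
    l1 ++ l2 ++ l3 ++ l4

def get_init_visited (board : List (List String)) : List (List Bool) :=
  (List.range board.length).map (fun _ => (List.range (board.headD []).length).map (fun _ => false))

def is_valid_white (node : Int × Int) (tot_rows tot_cols : Int)
    (board : List (List String)) (visited : List (List Bool)) : Bool :=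
  if node.1 < 0 || tot_rows ≤ node.1 then false
  else if node.2 < 0 || tot_cols ≤ node.2 then false
  else if pvCell board node.1 node.2 ≠ "W" then false
  else if pvVget visited node.1 node.2 then false
  else true

def pvDpos : List (Int × Int) := [(-1, 0), (0, 1), (1, 0), (0, -1)]

-- number of still-false entries; used only as the fuel bound making the while-loop total
def pvCnt (v : List (List Bool)) : Nat := (v.map (fun r => r.countP (fun b => !b))).sum

-- the while-queue loop of bfs; fuel only makes the recursion structural (Python has no fuel)
def bfs_loop (board : List (List String)) (tR tC : Int) :
    Nat → List (Int × Int) → List (List Bool) → List (List Bool)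
  | 0, _, visited => visited
  | _ + 1, [], visited => visited
  | fuel + 1, center :: rest, visited =>
      let s := pvDpos.foldl
        (fun (s : List (List Bool) × List (Int × Int)) p =>
          let node := (center.1 + p.1, center.2 + p.2)
          if is_valid_white node tR tC board s.1 then (pvVset s.1 node.1 node.2, s.2 ++ [node])
          else s)
        (visited, ([] : List (Int × Int)))
      bfs_loop board tR tC fuel (rest ++ s.2) s.1

def bfs (board : List (List String)) (start : Int × Int) (visited : List (List Bool)) :
    List (List Bool) :=
  let tR : Int := (board.length : Int)
  let tC : Int := ((board.headD []).length : Int)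
  if pvVget visited start.1 start.2 then visited
  else bfs_loop board tR tC (pvCnt visited + 2) [start] (pvVset visited start.1 start.2)

def paint_enclosed_whites_to_blacks (board : List (List String)) : List (List String) :=
  let bws := get_boundary_whites board
  let visited := bws.foldl (fun v item => bfs board item v) (get_init_visited board)
  board.mapIdx (fun i row => row.mapIdx (fun j cell =>
    if cell = "W" ∧ pvVget visited (i : Int) (j : Int) = false then "B" else cell))

-- ===== PORT B =====
-- parent[k] for an id k (all ids are in range when accessed; the getD default is never returned)
def pvPar (parent : List Nat) (k : Nat) : Nat := parent.getD k k

-- Source B's find: while parent[k] != k: k = parent[k].  Fuel len(parent) only makes the loop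
-- structural: with union by larger index parent chains strictly increase, so it never runs out.
def uf_find (parent : List Nat) : Nat → Nat → Nat
  | 0, k => k
  | f + 1, k => if pvPar parent k = k then k else uf_find parent f (pvPar parent k)

def uf_union (parent : List Nat) (a b : Nat) : List Nat :=
  let ra := uf_find parent parent.length a
  let rb := uf_find parent parent.length b
  if ra < rb then parent.set ra rb
  else if rb < ra then parent.set rb ra
  else parent

-- the (i, j) pairs visited by Source B's nested "for i in range(rows): for j in range(cols)" loops
def pvCellsN (rows cols : Nat) : List (Nat × Nat) :=
  (List.range rows).flatMap (fun i => (List.range cols).map (fun j => (i, j)))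

def pvCellN (board : List (List String)) (i j : Nat) : String := pvCell board (i : Int) (j : Int)

-- the union calls Source B performs, in loop order (the pair list does not depend on parent)
def pvUnionPairs (board : List (List String)) (rows cols : Nat) : List (Nat × Nat) :=
  (pvCellsN rows cols).flatMap (fun c =>
    if pvCellN board c.1 c.2 = "W" then
      (if c.1 + 1 < rows ∧ pvCellN board (c.1 + 1) c.2 = "W"
        then [(c.1 * cols + c.2, (c.1 + 1) * cols + c.2)] else []) ++
      (if c.2 + 1 < cols ∧ pvCellN board c.1 (c.2 + 1) = "W"
        then [(c.1 * cols + c.2, c.1 * cols + c.2 + 1)] else [])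
    else [])

def paint_enclosed_whites_to_blacks_alt (board : List (List String)) : List (List String) :=
  let rows := board.length
  let cols := (board.headD []).length
  let parent := (pvUnionPairs board rows cols).foldl
    (fun p c => uf_union p c.1 c.2) (List.range (rows * cols))
  let bws := (pvCellsN rows cols).filter (fun c =>
    decide (pvCellN board c.1 c.2 = "W" ∧
      (c.1 = 0 ∨ c.1 = rows - 1 ∨ c.2 = 0 ∨ c.2 = cols - 1)))
  let roots := PySem.Set.ofList (bws.map (fun c => uf_find parent parent.length (c.1 * cols + c.2)))
  board.mapIdx (fun i row => row.mapIdx (fun j cell =>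
    if j < cols ∧ cell = "W" ∧ uf_find parent parent.length (i * cols + j) ∉ roots
    then "B" else cell))

-- ===== PRECONDITION & SPEC =====
-- Pre_ is exactly where A returns: on the empty board, a board whose first row is empty, a row
-- shorter than the first, or a 'W' at a column index ≥ len(board[0]), Python A raises IndexError.
def Pre_paint_enclosed_whites_to_blacks (board : List (List String)) : Prop :=
  board ≠ [] ∧ 1 ≤ (board.headD []).length ∧
  ∀ r ∈ board, (board.headD []).length ≤ r.length ∧
    ∀ x ∈ r.drop (board.headD []).length, x ≠ "W"
instance (board : List (List String)) : Decidable (Pre_paint_enclosed_whites_to_blacks board) := by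
  unfold Pre_paint_enclosed_whites_to_blacks; infer_instance

def pvWitness_paint_enclosed_whites_to_blacks : List (List String) :=
  [["W", "B"], ["B", "B"]]

def Spec_paint_enclosed_whites_to_blacks (board : List (List String))
    (out : List (List String)) : Prop := out = paint_enclosed_whites_to_blacks_alt board
instance (board : List (List String)) (out : List (List String)) :
    Decidable (Spec_paint_enclosed_whites_to_blacks board out) := by
  unfold Spec_paint_enclosed_whites_to_blacks; infer_instance

-- ===== CLAIM (what is proved, stated in full; the proofs are below) =====
def Claim_equal_paint_enclosed_whites_to_blacks : Prop :=
  ∀ (board : List (List String)), Dom_paint_enclosed_whites_to_blacks board →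
    Pre_paint_enclosed_whites_to_blacks board →
    Spec_paint_enclosed_whites_to_blacks board (paint_enclosed_whites_to_blacks board)

-- ===== LEMMAS AND PROOFS =====

-- grid dimensions and the reachability predicate both programs compute
def pvR (b : List (List String)) : Nat := b.length
def pvC (b : List (List String)) : Nat := (b.headD []).length

def pvInb (b : List (List String)) (i j : Int) : Prop :=
  0 ≤ i ∧ i < (pvR b : Int) ∧ 0 ≤ j ∧ j < (pvC b : Int)

def pvWhite (b : List (List String)) (i j : Int) : Prop :=
  pvInb b i j ∧ pvCell b i j = "W"

def pvBoundary (b : List (List String)) (i j : Int) : Prop :=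
  i = 0 ∨ i = (pvR b : Int) - 1 ∨ j = 0 ∨ j = (pvC b : Int) - 1

inductive pvReach (b : List (List String)) : Int → Int → Prop
  | boundary (i j : Int) : pvWhite b i j → pvBoundary b i j → pvReach b i j
  | step (i j di dj : Int) : pvReach b i j → (di, dj) ∈ pvDpos →
      pvWhite b (i + di) (j + dj) → pvReach b (i + di) (j + dj)

def pvShape (R C : Nat) (v : List (List Bool)) : Prop :=
  v.length = R ∧ ∀ r ∈ v, r.length = C

def pvSound (b : List (List String)) (v : List (List Bool)) : Prop :=
  ∀ i j : Int, 0 ≤ i → 0 ≤ j → pvVget v i j = true → pvReach b i j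

def pvClosedE (b : List (List String)) (v : List (List Bool)) (q : List (Int × Int)) : Prop :=
  ∀ i j : Int, 0 ≤ i → 0 ≤ j → pvVget v i j = true → (i, j) ∉ q →
    ∀ d ∈ pvDpos, pvWhite b (i + d.1) (j + d.2) → pvVget v (i + d.1) (j + d.2) = true

-- ---- basic access lemmas ----
theorem pvVget_nonneg (v : List (List Bool)) {i j : Int} (hi : 0 ≤ i) (hj : 0 ≤ j) :
    pvVget v i j = ((v[i.toNat]?.getD [])[j.toNat]?.getD false) := by
  simp [pvVget, PySem.List.pyGet?_of_nonneg _ hi, PySem.List.pyGet?_of_nonneg _ hj]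

theorem pvVget_pvVset_of_ne (v : List (List Bool)) {i j a c : Int}
    (hi : 0 ≤ i) (hj : 0 ≤ j) (ha : 0 ≤ a) (hc : 0 ≤ c) (hne : a ≠ i ∨ c ≠ j) :
    pvVget (pvVset v i j) a c = pvVget v a c := by
  rw [pvVget_nonneg _ ha hc, pvVget_nonneg _ ha hc]
  unfold pvVset
  by_cases hia : a.toNat = i.toNat
  · have hia' : a = i := by omega
    have hjc : c.toNat ≠ j.toNat := by
      rcases hne with h | h
      · exact absurd hia' h
      · omega
    subst hia'
    by_cases hlen : a.toNat < v.length
    · rw [List.getElem?_set_self hlen]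
      simp [List.getElem?_set_ne (by omega : j.toNat ≠ c.toNat)]
    · rw [List.set_eq_of_length_le (by omega)]
  · rw [List.getElem?_set_ne (by omega : i.toNat ≠ a.toNat)]

theorem pvVget_pvVset_self (v : List (List Bool)) {i j : Int}
    (hi : 0 ≤ i) (hj : 0 ≤ j)
    (hlen : i.toNat < v.length) (hrow : j.toNat < (v[i.toNat]?.getD []).length) :
    pvVget (pvVset v i j) i j = true := by
  rw [pvVget_nonneg _ hi hj]
  unfold pvVset
  rw [List.getElem?_set_self (by simpa using hlen)]
  simp [List.getElem?_set_self hrow]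

theorem pvVget_pvVset_imp (v : List (List Bool)) {i j a c : Int}
    (hi : 0 ≤ i) (hj : 0 ≤ j) (ha : 0 ≤ a) (hc : 0 ≤ c)
    (h : pvVget (pvVset v i j) a c = true) :
    pvVget v a c = true ∨ (a = i ∧ c = j) := by
  by_cases hne : a = i ∧ c = j
  · exact Or.inr hne
  · left
    rw [← pvVget_pvVset_of_ne v hi hj ha hc (by tauto)]
    exact h

theorem pvVget_pvVset_mono (v : List (List Bool)) {i j a c : Int}
    (hi : 0 ≤ i) (hj : 0 ≤ j) (ha : 0 ≤ a) (hc : 0 ≤ c)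
    (h : pvVget v a c = true) : pvVget (pvVset v i j) a c = true := by
  by_cases hne : a = i ∧ c = j
  · obtain ⟨rfl, rfl⟩ := hne
    by_cases hlen : a.toNat < v.length
    · by_cases hrow : c.toNat < (v[a.toNat]?.getD []).length
      · exact pvVget_pvVset_self v ha hc hlen hrow
      · -- inner set is a noop: j out of row range
        unfold pvVset
        have hrw : (v[a.toNat]?.getD []).set c.toNat true = (v[a.toNat]?.getD []) :=
          List.set_eq_of_length_le (by omega)
        rw [hrw, List.getElem?_eq_getElem hlen]
        simp only [Option.getD_some]
        rw [List.set_getElem_self hlen]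
        exact h
    · unfold pvVset
      rw [List.set_eq_of_length_le (by omega)]
      exact h
  · rwa [pvVget_pvVset_of_ne v hi hj ha hc (by tauto)]

theorem pvShape_pvVset {R C : Nat} {v : List (List Bool)} (hs : pvShape R C v) (i j : Int) :
    pvShape R C (pvVset v i j) := by
  obtain ⟨hl, hr⟩ := hs
  by_cases hlen : i.toNat < v.length
  · refine ⟨by simpa [pvVset] using hl, ?_⟩
    intro r hrmem
    rcases List.mem_or_eq_of_mem_set hrmem with h | rfl
    · exact hr r h
    · rw [List.length_set]
      exact hr _ (by simp [List.getElem?_eq_getElem hlen, List.getElem_mem])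
  · unfold pvVset
    rw [List.set_eq_of_length_le (by omega)]
    exact ⟨hl, hr⟩

theorem countP_set_true_le (l : List Bool) (m : Nat) :
    (l.set m true).countP (fun b => !b) ≤ l.countP (fun b => !b) := by
  induction l generalizing m with
  | nil => simp
  | cons x xs ih =>
    cases m with
    | zero => cases x <;> simp [List.countP_cons]
    | succ m => simpa [List.countP_cons] using ih m

theorem countP_set_true_lt (l : List Bool) (m : Nat) (h : l[m]? = some false) :
    (l.set m true).countP (fun b => !b) < l.countP (fun b => !b) := by
  induction l generalizing m with
  | nil => simp at h
  | cons x xs ih =>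
    cases m with
    | zero =>
      simp at h
      subst h
      simpa [List.countP_cons] using countP_set_true_le xs 0 |>.trans_lt (by omega)
    | succ m =>
      simp at h
      simpa [List.countP_cons] using ih m h

theorem pvCnt_set_le (v : List (List Bool)) (n : Nat) (r' : List Bool)
    (h : r'.countP (fun b => !b) ≤ (v[n]?.getD []).countP (fun b => !b)) :
    pvCnt (v.set n r') ≤ pvCnt v := by
  induction v generalizing n with
  | nil => simp [pvCnt]
  | cons x xs ih =>
    cases n with
    | zero => simp_all [pvCnt]
    | succ n =>
      simp only [List.set_cons_succ, pvCnt, List.map_cons, List.sum_cons, List.length_cons] at *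
      have := ih n (by simpa using h)
      omega

theorem pvCnt_set_lt (v : List (List Bool)) (n : Nat) (r' : List Bool)
    (hn : n < v.length)
    (h : r'.countP (fun b => !b) < (v[n]?.getD []).countP (fun b => !b)) :
    pvCnt (v.set n r') < pvCnt v := by
  induction v generalizing n with
  | nil => simp at hn
  | cons x xs ih =>
    cases n with
    | zero => simp_all [pvCnt]
    | succ n =>
      simp only [List.set_cons_succ, pvCnt, List.map_cons, List.sum_cons, List.length_cons] at *
      have := ih n (by omega) (by simpa using h)
      omega

theorem pvCnt_pvVset_le (v : List (List Bool)) (i j : Int) :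
    pvCnt (pvVset v i j) ≤ pvCnt v :=
  pvCnt_set_le v i.toNat _ (countP_set_true_le _ _)

theorem pvCnt_pvVset_lt (v : List (List Bool)) {i j : Int}
    (hi : 0 ≤ i) (hj : 0 ≤ j)
    (hlen : i.toNat < v.length)
    (hrow : j.toNat < (v[i.toNat]?.getD []).length)
    (hfalse : pvVget v i j = false) :
    pvCnt (pvVset v i j) < pvCnt v := by
  rw [pvVget_nonneg _ hi hj] at hfalse
  refine pvCnt_set_lt v i.toNat _ hlen (countP_set_true_lt _ _ ?_)
  rw [List.getElem?_eq_getElem hrow]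
  have : (v[i.toNat]?.getD [])[j.toNat]?.getD false = (v[i.toNat]?.getD [])[j.toNat] := by
    rw [List.getElem?_eq_getElem hrow]; rfl
  rw [← this, hfalse]

-- ---- is_valid_white characterization ----
theorem ivw_iff (n : Int × Int) (b : List (List String)) (v : List (List Bool)) :
    is_valid_white n ((pvR b : Nat) : Int) ((pvC b : Nat) : Int) b v = true ↔
      (pvWhite b n.1 n.2 ∧ pvVget v n.1 n.2 = false) := by
  unfold is_valid_white pvWhite pvInb
  split_ifs with h1 h2 h3 h4 <;> simp_all <;> omega

-- ---- the inner for-loop over dpos in A's bfs ----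
theorem pvAfold_spec (b : List (List String)) (center : Int × Int) (ds : List (Int × Int)) :
    ∀ (v : List (List Bool)) (acc : List (Int × Int)),
      pvShape (pvR b) (pvC b) v →
      (∀ p ∈ acc, 0 ≤ p.1 ∧ 0 ≤ p.2 ∧ pvVget v p.1 p.2 = true) →
      (let r := ds.foldl (fun (s : List (List Bool) × List (Int × Int)) p =>
          let node := (center.1 + p.1, center.2 + p.2)
          if is_valid_white node ((pvR b : Nat) : Int) ((pvC b : Nat) : Int) b s.1
          then (pvVset s.1 node.1 node.2, s.2 ++ [node]) else s) (v, acc);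
       pvShape (pvR b) (pvC b) r.1 ∧
       (∀ a c : Int, 0 ≤ a → 0 ≤ c → pvVget v a c = true → pvVget r.1 a c = true) ∧
       (∀ a c : Int, 0 ≤ a → 0 ≤ c → pvVget r.1 a c = true →
          pvVget v a c = true ∨ (a, c) ∈ r.2) ∧
       (∀ p ∈ r.2, p ∈ acc ∨ (∃ d ∈ ds, p = (center.1 + d.1, center.2 + d.2) ∧
          pvWhite b p.1 p.2)) ∧
       (∀ p ∈ r.2, 0 ≤ p.1 ∧ 0 ≤ p.2 ∧ pvVget r.1 p.1 p.2 = true) ∧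
       (∀ d ∈ ds, pvWhite b (center.1 + d.1) (center.2 + d.2) →
          pvVget r.1 (center.1 + d.1) (center.2 + d.2) = true) ∧
       pvCnt r.1 + r.2.length ≤ pvCnt v + acc.length ∧
       (∃ t, r.2 = acc ++ t)) := by
  induction ds with
  | nil =>
    intro v acc hs hacc
    exact ⟨hs, fun a c _ _ h => h, fun a c _ _ h => Or.inl h,
      fun p hp => Or.inl hp, hacc, by simp, by simp, ⟨[], by simp⟩⟩
  | cons d ds ih =>
    intro v acc hs hacc
    simp only [List.foldl_cons]
    by_cases hval : is_valid_white (center.1 + d.1, center.2 + d.2)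
        ((pvR b : Nat) : Int) ((pvC b : Nat) : Int) b v = true
    · -- valid: visit the node and push it
      rw [if_pos hval]
      obtain ⟨hw, hfalse⟩ := (ivw_iff _ b v).1 hval
      obtain ⟨hn1, hn1R, hn2, hn2C⟩ := hw.1
      have hsv : pvShape (pvR b) (pvC b) (pvVset v (center.1 + d.1) (center.2 + d.2)) :=
        pvShape_pvVset hs _ _
      dsimp only at hw hfalse hn1 hn1R hn2 hn2C
      have hvlen : v.length = pvR b := hs.1
      have hlen : (center.1 + d.1).toNat < v.length := by omega
      have hrowC : (v[(center.1 + d.1).toNat]?.getD []).length = pvC b := by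
        rw [List.getElem?_eq_getElem hlen]
        exact hs.2 _ (List.getElem_mem _)
      have hrowlen : (center.2 + d.2).toNat < (v[(center.1 + d.1).toNat]?.getD []).length := by
        omega
      have hself : pvVget (pvVset v (center.1 + d.1) (center.2 + d.2))
          (center.1 + d.1) (center.2 + d.2) = true :=
        pvVget_pvVset_self v hn1 hn2 hlen hrowlen
      have hacc' : ∀ p ∈ acc ++ [(center.1 + d.1, center.2 + d.2)],
          0 ≤ p.1 ∧ 0 ≤ p.2 ∧
          pvVget (pvVset v (center.1 + d.1) (center.2 + d.2)) p.1 p.2 = true := by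
        intro p hp
        rcases List.mem_append.1 hp with hp | hp
        · obtain ⟨h1, h2, h3⟩ := hacc p hp
          exact ⟨h1, h2, pvVget_pvVset_mono v hn1 hn2 h1 h2 h3⟩
        · simp only [List.mem_singleton] at hp
          subst hp
          exact ⟨hn1, hn2, hself⟩
      obtain ⟨ih1, ih2, ih3, ih4, ih5, ih6, ih7, ih8⟩ := ih _ _ hsv hacc'
      obtain ⟨t, ht⟩ := ih8
      refine ⟨ih1, ?_, ?_, ?_, ih5, ?_, ?_, ?_⟩
      · intro a c ha hc hv
        exact ih2 a c ha hc (pvVget_pvVset_mono v hn1 hn2 ha hc hv)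
      · intro a c ha hc hv
        rcases ih3 a c ha hc hv with hv' | hmem
        · rcases pvVget_pvVset_imp v hn1 hn2 ha hc hv' with h | ⟨rfl, rfl⟩
          · exact Or.inl h
          · exact Or.inr (by simp [ht])
        · exact Or.inr hmem
      · intro p hp
        rcases ih4 p hp with hp' | ⟨e, he, hpe⟩
        · rcases List.mem_append.1 hp' with h | h
          · exact Or.inl h
          · simp only [List.mem_singleton] at h
            subst h
            exact Or.inr ⟨d, List.mem_cons_self, rfl, hw⟩
        · exact Or.inr ⟨e, List.mem_cons_of_mem _ he, hpe⟩
      · intro e he hwhite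
        rcases List.mem_cons.1 he with rfl | he'
        · exact ih2 _ _ hn1 hn2 hself
        · exact ih6 e he' hwhite
      · have hlt : pvCnt (pvVset v (center.1 + d.1) (center.2 + d.2)) < pvCnt v :=
          pvCnt_pvVset_lt v hn1 hn2 hlen hrowlen hfalse
        simp only [List.length_append, List.length_singleton] at ih7
        omega
      · exact ⟨(center.1 + d.1, center.2 + d.2) :: t, by simp [ht]⟩
    · rw [if_neg hval]
      obtain ⟨ih1, ih2, ih3, ih4, ih5, ih6, ih7, ih8⟩ := ih v acc hs hacc
      refine ⟨ih1, ih2, ih3, ?_, ih5, ?_, ih7, ih8⟩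
      · intro p hp
        rcases ih4 p hp with h | ⟨e, he, hpe⟩
        · exact Or.inl h
        · exact Or.inr ⟨e, List.mem_cons_of_mem _ he, hpe⟩
      · intro e he hwhite
        rcases List.mem_cons.1 he with rfl | he'
        · -- invalid but white: must be already visited
          have : ¬ (pvWhite b (center.1 + e.1) (center.2 + e.2) ∧
              pvVget v (center.1 + e.1) (center.2 + e.2) = false) :=
            fun hcon => hval ((ivw_iff _ b v).2 hcon)
          have hvis : pvVget v (center.1 + e.1) (center.2 + e.2) = true := by
            by_cases hb : pvVget v (center.1 + e.1) (center.2 + e.2) = true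
            · exact hb
            · exact absurd ⟨hwhite, by simpa using hb⟩ this
          exact ih2 _ _ hwhite.1.1 hwhite.1.2.2.1 hvis
        · exact ih6 e he' hwhite

-- ---- the while-queue loop of A's bfs ----
theorem pvbfs_loop_spec (b : List (List String)) :
    ∀ (fuel : Nat) (q : List (Int × Int)) (v : List (List Bool)),
      pvShape (pvR b) (pvC b) v →
      (∀ p ∈ q, 0 ≤ p.1 ∧ 0 ≤ p.2 ∧ pvVget v p.1 p.2 = true) →
      pvSound b v →
      pvClosedE b v q →
      pvCnt v + q.length < fuel →
      (let v' := bfs_loop b ((pvR b : Nat) : Int) ((pvC b : Nat) : Int) fuel q v;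
       pvShape (pvR b) (pvC b) v' ∧ pvSound b v' ∧ pvClosedE b v' [] ∧
       (∀ a c : Int, 0 ≤ a → 0 ≤ c → pvVget v a c = true → pvVget v' a c = true)) := by
  intro fuel
  induction fuel with
  | zero => intro q v _ _ _ _ hfuel; omega
  | succ fuel ih =>
    intro q v hs hq hsound hclosed hfuel
    match q with
    | [] =>
      exact ⟨hs, hsound, hclosed, fun a c _ _ h => h⟩
    | center :: rest =>
      have hcenter := hq center List.mem_cons_self
      have hreach : pvReach b center.1 center.2 :=
        hsound center.1 center.2 hcenter.1 hcenter.2.1 hcenter.2.2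
      obtain ⟨f1, f2, f3, f4, f5, f6, f7, f8⟩ :=
        pvAfold_spec b center pvDpos v [] hs (by simp)
      simp only [bfs_loop]
      set r := pvDpos.foldl (fun (s : List (List Bool) × List (Int × Int)) p =>
          let node := (center.1 + p.1, center.2 + p.2)
          if is_valid_white node ((pvR b : Nat) : Int) ((pvC b : Nat) : Int) b s.1
          then (pvVset s.1 node.1 node.2, s.2 ++ [node]) else s) (v, ([] : List (Int × Int)))
        with hr
      have hpush : ∀ p ∈ r.2, ∃ d ∈ pvDpos, p = (center.1 + d.1, center.2 + d.2) ∧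
          pvWhite b p.1 p.2 := by
        intro p hp
        rcases f4 p hp with h | h
        · simp at h
        · exact h
      have hsound' : pvSound b r.1 := by
        intro a c ha hc hv
        rcases f3 a c ha hc hv with h | h
        · exact hsound a c ha hc h
        · obtain ⟨d, hd, hpe, hwhite⟩ := hpush _ h
          rcases Prod.mk.inj hpe with ⟨rfl, rfl⟩
          exact pvReach.step center.1 center.2 d.1 d.2 hreach hd hwhite
      have hqinv' : ∀ p ∈ rest ++ r.2, 0 ≤ p.1 ∧ 0 ≤ p.2 ∧ pvVget r.1 p.1 p.2 = true := by
        intro p hp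
        rcases List.mem_append.1 hp with hp | hp
        · obtain ⟨h1, h2, h3⟩ := hq p (List.mem_cons_of_mem _ hp)
          exact ⟨h1, h2, f2 _ _ h1 h2 h3⟩
        · exact f5 p hp
      have hclosed' : pvClosedE b r.1 (rest ++ r.2) := by
        intro i j hi hj hv hnin d hd hwhite
        by_cases hvv : pvVget v i j = true
        · by_cases hic : (i, j) = center
          · have := f6 d hd
            rw [← hic] at this
            exact this hwhite
          · have hninq : (i, j) ∉ center :: rest := by
              intro hmem
              rcases List.mem_cons.1 hmem with h | h
              · exact hic h
              · exact hnin (List.mem_append.2 (Or.inl h))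
            have := hclosed i j hi hj hvv hninq d hd hwhite
            exact f2 _ _ (by exact hwhite.1.1) (by exact hwhite.1.2.2.1) this
        · rcases f3 i j hi hj hv with h | h
          · exact absurd h hvv
          · exact absurd (List.mem_append.2 (Or.inr h)) hnin
      have hfuel' : pvCnt r.1 + (rest ++ r.2).length < fuel := by
        simp only [List.length_append, List.length_cons] at hfuel ⊢
        simp only [List.length_nil] at f7
        omega
      exact ih (rest ++ r.2) r.1 f1 hqinv' hsound' hclosed' hfuel' |>.imp id
        (fun ⟨g2, g3, g4⟩ => ⟨g2, g3, fun a c ha hc hv =>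
          g4 a c ha hc (f2 a c ha hc hv)⟩)

-- ---- A's bfs ----
theorem pvbfs_spec (b : List (List String)) (p : Int × Int) (v : List (List Bool))
    (hw : pvWhite b p.1 p.2) (hbd : pvBoundary b p.1 p.2)
    (hs : pvShape (pvR b) (pvC b) v) (hsound : pvSound b v) (hclosed : pvClosedE b v []) :
    pvShape (pvR b) (pvC b) (bfs b p v) ∧ pvSound b (bfs b p v) ∧
    pvClosedE b (bfs b p v) [] ∧
    (∀ a c : Int, 0 ≤ a → 0 ≤ c → pvVget v a c = true → pvVget (bfs b p v) a c = true) ∧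
    pvVget (bfs b p v) p.1 p.2 = true := by
  obtain ⟨hp1, hp1R, hp2, hp2C⟩ := hw.1
  unfold bfs
  by_cases hvis : pvVget v p.1 p.2 = true
  · rw [if_pos hvis]
    exact ⟨hs, hsound, hclosed, fun a c _ _ h => h, hvis⟩
  · rw [if_neg hvis]
    have hvlen : v.length = pvR b := hs.1
    have hlen : p.1.toNat < v.length := by omega
    have hrowC : (v[p.1.toNat]?.getD []).length = pvC b := by
      rw [List.getElem?_eq_getElem hlen]
      exact hs.2 _ (List.getElem_mem _)
    have hrowlen : p.2.toNat < (v[p.1.toNat]?.getD []).length := by omega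
    have hself : pvVget (pvVset v p.1 p.2) p.1 p.2 = true :=
      pvVget_pvVset_self v hp1 hp2 hlen hrowlen
    have hsv : pvShape (pvR b) (pvC b) (pvVset v p.1 p.2) := pvShape_pvVset hs _ _
    have hsound' : pvSound b (pvVset v p.1 p.2) := by
      intro a c ha hc hv
      rcases pvVget_pvVset_imp v hp1 hp2 ha hc hv with h | ⟨rfl, rfl⟩
      · exact hsound a c ha hc h
      · exact pvReach.boundary _ _ hw hbd
    have hclosed' : pvClosedE b (pvVset v p.1 p.2) [p] := by
      intro i j hi hj hv hnin d hd hwhite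
      have hne : (i, j) ≠ p := by simpa using hnin
      rcases pvVget_pvVset_imp v hp1 hp2 hi hj hv with h | ⟨rfl, rfl⟩
      · exact pvVget_pvVset_mono v hp1 hp2 hwhite.1.1 hwhite.1.2.2.1
          (hclosed i j hi hj h (by simp) d hd hwhite)
      · exact absurd (Prod.mk.eta) hne
    have hqinv : ∀ q ∈ [p], 0 ≤ q.1 ∧ 0 ≤ q.2 ∧ pvVget (pvVset v p.1 p.2) q.1 q.2 = true := by
      intro q hq
      simp only [List.mem_singleton] at hq
      subst hq
      exact ⟨hp1, hp2, hself⟩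
    have hfuel : pvCnt (pvVset v p.1 p.2) + [p].length < pvCnt v + 2 := by
      have := pvCnt_pvVset_le v p.1 p.2
      simp only [List.length_singleton]
      omega
    obtain ⟨g1, g2, g3, g4⟩ :=
      pvbfs_loop_spec b (pvCnt v + 2) [p] (pvVset v p.1 p.2) hsv hqinv hsound' hclosed' hfuel
    exact ⟨g1, g2, g3,
      fun a c ha hc hv => g4 a c ha hc (pvVget_pvVset_mono v hp1 hp2 ha hc hv),
      g4 p.1 p.2 hp1 hp2 hself⟩

-- ---- initial visited matrix ----
theorem pv_init_shape (b : List (List String)) :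
    pvShape (pvR b) (pvC b) (get_init_visited b) := by
  constructor
  · simp [get_init_visited, pvR]
  · intro r hr
    simp only [get_init_visited, List.mem_map] at hr
    obtain ⟨_, _, rfl⟩ := hr
    simp [pvC]

theorem pv_init_false (b : List (List String)) (i j : Int) :
    pvVget (get_init_visited b) i j = false := by
  unfold pvVget get_init_visited
  cases h : PySem.List.pyGet? ((List.range b.length).map
      fun _ => (List.range (b.headD []).length).map fun _ => false) i with
  | none =>
    simp only [Option.getD_none]
    cases h2 : PySem.List.pyGet? ([] : List Bool) j with
    | none => rfl
    | some x => exact absurd (PySem.List.mem_of_pyGet?_eq_some _ h2) (by simp)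
  | some row =>
    have hrow : row = (List.range (b.headD []).length).map fun _ => false := by
      have := PySem.List.mem_of_pyGet?_eq_some _ h
      simp only [List.mem_map] at this
      obtain ⟨_, _, hr⟩ := this
      exact hr.symm
    simp only [Option.getD_some]
    cases h2 : PySem.List.pyGet? row j with
    | none => rfl
    | some x =>
      have := PySem.List.mem_of_pyGet?_eq_some _ h2
      rw [hrow] at this
      simp only [List.mem_map] at this
      obtain ⟨_, _, hx⟩ := this
      simp [← hx]

theorem pv_init_false' (b : List (List String)) (i j : Int) :
    pvVget (get_init_visited b) i j ≠ true := by
  simp [pv_init_false]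

-- ---- the for-loop over boundary whites in A ----
theorem pvbws_fold_spec (b : List (List String)) :
    ∀ (l : List (Int × Int)) (v : List (List Bool)),
      (∀ p ∈ l, pvWhite b p.1 p.2 ∧ pvBoundary b p.1 p.2) →
      pvShape (pvR b) (pvC b) v → pvSound b v → pvClosedE b v [] →
      (let v' := l.foldl (fun v item => bfs b item v) v;
       pvShape (pvR b) (pvC b) v' ∧ pvSound b v' ∧ pvClosedE b v' [] ∧
       (∀ a c : Int, 0 ≤ a → 0 ≤ c → pvVget v a c = true → pvVget v' a c = true) ∧
       (∀ p ∈ l, pvVget v' p.1 p.2 = true)) := by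
  intro l
  induction l with
  | nil => intro v _ hs hsound hclosed; exact ⟨hs, hsound, hclosed, fun _ _ _ _ h => h, by simp⟩
  | cons p l ihl =>
    intro v hl hs hsound hclosed
    obtain ⟨hw, hbd⟩ := hl p List.mem_cons_self
    obtain ⟨g1, g2, g3, g4, g5⟩ := pvbfs_spec b p v hw hbd hs hsound hclosed
    obtain ⟨k1, k2, k3, k4, k5⟩ := ihl (bfs b p v)
      (fun q hq => hl q (List.mem_cons_of_mem _ hq)) g1 g2 g3
    simp only [List.foldl_cons]
    refine ⟨k1, k2, k3, fun a c ha hc hv => k4 a c ha hc (g4 a c ha hc hv), ?_⟩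
    intro q hq
    rcases List.mem_cons.1 hq with rfl | hq'
    · exact k4 q.1 q.2 hw.1.1 hw.1.2.2.1 g5
    · exact k5 q hq'

-- ---- cell access under Pre_ ----
theorem pvCell_getElem (b : List (List String)) (i j : Nat)
    (hi : i < b.length) (hj : j < b[i].length) :
    pvCell b (i : Int) (j : Int) = b[i][j] := by
  simp [pvCell, PySem.List.pyGet?_natCast, List.getElem?_eq_getElem, hi, hj]

theorem pv_head (b : List (List String)) (hb : b.length ≠ 0) :
    b[0]?.getD [] = b.headD [] := by
  cases b with
  | nil => simp at hb
  | cons x xs => rfl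

theorem pv_noW (b : List (List String)) (hpre : Pre_paint_enclosed_whites_to_blacks b)
    (i j : Nat) (hi : i < b.length) (hj : j < b[i].length) (hCj : pvC b ≤ j) :
    b[i][j] ≠ "W" := by
  have hmem : b[i][j] ∈ b[i].drop (b.headD []).length := by
    have hlt : j - pvC b < (b[i].drop (pvC b)).length := by
      simp only [List.length_drop]; omega
    have heq : (b[i].drop (pvC b))[j - pvC b] = b[i][j] := by
      rw [List.getElem_drop]; congr 1; omega
    have : (b[i].drop (pvC b))[j - pvC b] ∈ b[i].drop (pvC b) := List.getElem_mem hlt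
    rw [heq] at this
    exact this
  exact (hpre.2.2 _ (List.getElem_mem hi)).2 _ hmem

theorem pv_mem_bws (b : List (List String)) (hpre : Pre_paint_enclosed_whites_to_blacks b)
    (p : Int × Int) :
    p ∈ get_boundary_whites b ↔ (pvWhite b p.1 p.2 ∧ pvBoundary b p.1 p.2) := by
  have hbne := hpre.1
  have hC1 : 1 ≤ pvC b := hpre.2.1
  have hblen : b.length ≠ 0 := fun h => hbne (List.length_eq_zero_iff.1 h)
  have hR1 : 1 ≤ pvR b := by unfold pvR; omega
  have hrowlen : ∀ (k : Nat) (hk : k < b.length), pvC b ≤ (b[k]'hk).length :=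
    fun k hk => (hpre.2.2 _ (List.getElem_mem hk)).1
  have hhead : b.headD [] = b[0]'(by omega) := by
    rw [← pv_head b hblen, List.getElem?_eq_getElem (by omega)]
    rfl
  have hheadlen : (b.headD []).length = pvC b := rfl
  have hlast : PySem.List.pyGet? b ((b.length : Int) - 1) = some (b[b.length - 1]'(by omega)) := by
    rw [show ((b.length : Int) - 1) = ((b.length - 1 : Nat) : Int) by omega,
      PySem.List.pyGet?_natCast, List.getElem?_eq_getElem (by omega)]
  unfold get_boundary_whites
  rw [if_neg hblen]
  simp only [List.mem_append, List.mem_filterMap, PySem.List.mem_enumerate_iff]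
  constructor
  · rintro (((⟨ci, ⟨k, hk, rfl⟩, hf⟩ | ⟨ri, ⟨k, hk, rfl⟩, hf⟩) |
      ⟨ci, hci, hf⟩) | ⟨ri, ⟨k, hk, rfl⟩, hf⟩)
    · -- top row
      rw [hheadlen] at hk
      split at hf
      case isFalse => simp at hf
      case isTrue hcell =>
        obtain rfl : p = (0, (k : Int)) := by
          simp only [Option.some.injEq] at hf
          rw [← hf]
          simp
        dsimp only at hcell ⊢
        have hc : pvCell b ((0 : Nat) : Int) ((k : Nat) : Int) = (b[0]'(by omega))[k]'(by
            have := hrowlen 0 (by omega); omega) :=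
          pvCell_getElem b 0 k (by omega) (by have := hrowlen 0 (by omega); omega)
        refine ⟨⟨⟨by omega, by unfold pvR; push_cast; omega, by omega, by push_cast; omega⟩, ?_⟩,
          Or.inl rfl⟩
        rw [show ((0 : Int)) = ((0 : Nat) : Int) by simp, hc]
        simp only [hhead] at hcell
        exact hcell
    · -- right column
      split at hf
      case isFalse => simp at hf
      case isTrue hcell =>
        obtain rfl : p = ((k : Int), ((b.headD []).length : Int) - 1) := by
          simp only [Option.some.injEq] at hf
          rw [← hf]
          simp
        dsimp only at hcell ⊢
        rw [hheadlen] at hcell ⊢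
        have hkR : k < b.length := hk
        have hlen := hrowlen k hkR
        rw [show ((pvC b : Int) - 1) = ((pvC b - 1 : Nat) : Int) by omega] at hcell ⊢
        rw [PySem.List.pyGet?_natCast, List.getElem?_eq_getElem (by omega)] at hcell
        simp only [Option.getD_some] at hcell
        have hc : pvCell b ((k : Nat) : Int) ((pvC b - 1 : Nat) : Int) =
            (b[k]'hkR)[pvC b - 1]'(by omega) := pvCell_getElem b k (pvC b - 1) hkR (by omega)
        refine ⟨⟨⟨by omega, by unfold pvR; push_cast; omega, by omega,
          by unfold pvC at *; push_cast; omega⟩, ?_⟩,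
          Or.inr (Or.inr (Or.inr (by unfold pvC; push_cast; omega)))⟩
        rw [hc]
        exact hcell
    · -- bottom row
      rw [hlast] at hci
      simp only [Option.getD_some] at hci
      obtain ⟨k, hk, rfl⟩ := hci
      split at hf
      case isFalse => simp at hf
      case isTrue hcell =>
        have hRm1 : b.length - 1 < b.length := by omega
        obtain rfl : p = (((b.length : Int) - 1), (k : Int)) := by
          simp only [Option.some.injEq] at hf
          rw [← hf]
          simp
        dsimp only at hcell ⊢
        have hkC : k < pvC b := by
          by_contra hge
          exact pv_noW b hpre (b.length - 1) k hRm1 hk (by omega) hcell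
        have hc : pvCell b ((b.length - 1 : Nat) : Int) ((k : Nat) : Int) =
            (b[b.length - 1]'hRm1)[k]'hk := pvCell_getElem b (b.length - 1) k hRm1 hk
        refine ⟨⟨⟨by omega, by unfold pvR; push_cast; omega, by omega, by push_cast; omega⟩, ?_⟩,
          Or.inr (Or.inl (by unfold pvR; push_cast; omega))⟩
        rw [show ((b.length : Int) - 1) = ((b.length - 1 : Nat) : Int) by omega, hc]
        exact hcell
    · -- left column
      split at hf
      case isFalse => simp at hf
      case isTrue hcell =>
        obtain rfl : p = ((k : Int), (0 : Int)) := by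
          simp only [Option.some.injEq] at hf
          rw [← hf]
          simp
        dsimp only at hcell ⊢
        have hkR : k < b.length := hk
        have hlen := hrowlen k hkR
        rw [show ((0 : Int)) = ((0 : Nat) : Int) by simp] at hcell ⊢
        rw [PySem.List.pyGet?_natCast, List.getElem?_eq_getElem (by omega)] at hcell
        simp only [Option.getD_some] at hcell
        have hc : pvCell b ((k : Nat) : Int) ((0 : Nat) : Int) = (b[k]'hkR)[0]'(by omega) :=
          pvCell_getElem b k 0 hkR (by omega)
        refine ⟨⟨⟨by omega, by unfold pvR; push_cast; omega, by omega, by push_cast; omega⟩, ?_⟩,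
          Or.inr (Or.inr (Or.inl rfl))⟩
        rw [hc]
        exact hcell
  · rintro ⟨⟨⟨hp1, hp1R, hp2, hp2C⟩, hcell⟩, hbd⟩
    have hi : p.1 = ((p.1.toNat : Nat) : Int) := by omega
    have hj : p.2 = ((p.2.toNat : Nat) : Int) := by omega
    have hiR : p.1.toNat < b.length := by unfold pvR at hp1R; omega
    have hjC : p.2.toNat < pvC b := by unfold pvC at hp2C ⊢; omega
    have hlenrow := hrowlen p.1.toNat hiR
    have hc : pvCell b ((p.1.toNat : Nat) : Int) ((p.2.toNat : Nat) : Int) =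
        (b[p.1.toNat]'hiR)[p.2.toNat]'(by omega) :=
      pvCell_getElem b p.1.toNat p.2.toNat hiR (by omega)
    have hW : (b[p.1.toNat]'hiR)[p.2.toNat]'(by omega) = "W" := by
      rw [← hc, ← hi, ← hj]
      exact hcell
    rcases hbd with h0 | hR | hj0 | hjC1
    · -- p.1 = 0
      refine Or.inl (Or.inl (Or.inl ⟨((0 : Int) + (p.2.toNat : Int), (b.headD [])[p.2.toNat]'(by
        rw [hheadlen]; omega)), ⟨p.2.toNat, by rw [hheadlen]; omega, rfl⟩, ?_⟩))
      rw [if_pos (by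
        show (b.headD [])[p.2.toNat]'(by rw [hheadlen]; omega) = "W"
        have h00 : p.1.toNat = 0 := by omega
        simp only [h00] at hW
        simp only [hhead]
        exact hW)]
      simp only [Option.some.injEq]
      refine Prod.ext ?_ ?_ <;> dsimp <;> omega
    · -- p.1 = R - 1
      refine Or.inl (Or.inr ⟨((0 : Int) + (p.2.toNat : Int),
        ((PySem.List.pyGet? b ((b.length : Int) - 1)).getD [])[p.2.toNat]'(by
          simp only [hlast, Option.getD_some]; have := hrowlen (b.length - 1) (by omega);
          omega)), ⟨p.2.toNat, by
            simp only [hlast, Option.getD_some]; have := hrowlen (b.length - 1) (by omega);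
            omega, rfl⟩, ?_⟩)
      rw [if_pos (by
        show ((PySem.List.pyGet? b ((b.length : Int) - 1)).getD [])[p.2.toNat]'(by
            simp only [hlast, Option.getD_some]; have := hrowlen (b.length - 1) (by omega);
            omega) = "W"
        have hieq : p.1.toNat = b.length - 1 := by unfold pvR at hR; omega
        simp only [hlast, Option.getD_some]
        simp only [← hieq] at *
        exact hW)]
      simp only [Option.some.injEq]
      refine Prod.ext ?_ ?_ <;> dsimp <;> unfold pvR at hR <;> omega
    · -- p.2 = 0
      refine Or.inr ⟨((0 : Int) + (p.1.toNat : Int), b[p.1.toNat]'hiR),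
        ⟨p.1.toNat, hiR, rfl⟩, ?_⟩
      rw [if_pos (by
        show (PySem.List.pyGet? (b[p.1.toNat]'hiR) 0).getD "" = "W"
        rw [show ((0 : Int)) = ((0 : Nat) : Int) by simp, PySem.List.pyGet?_natCast,
          List.getElem?_eq_getElem (by omega)]
        simp only [Option.getD_some]
        have : p.2.toNat = 0 := by omega
        simp only [← this]
        exact hW)]
      simp only [Option.some.injEq]
      refine Prod.ext ?_ ?_ <;> dsimp <;> omega
    · -- p.2 = C - 1
      refine Or.inl (Or.inl (Or.inr ⟨((0 : Int) + (p.1.toNat : Int), b[p.1.toNat]'hiR),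
        ⟨p.1.toNat, hiR, rfl⟩, ?_⟩))
      rw [if_pos (by
        show (PySem.List.pyGet? (b[p.1.toNat]'hiR) (((b.headD []).length : Int) - 1)).getD "" = "W"
        rw [hheadlen, show ((pvC b : Int) - 1) = ((pvC b - 1 : Nat) : Int) by omega,
          PySem.List.pyGet?_natCast, List.getElem?_eq_getElem (by omega)]
        simp only [Option.getD_some]
        have : p.2.toNat = pvC b - 1 := by unfold pvC at hjC1; omega
        simp only [← this]
        exact hW)]
      simp only [Option.some.injEq]
      refine Prod.ext ?_ ?_ <;> dsimp <;> unfold pvC at hjC1 <;> omega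

theorem pvReach_white {b : List (List String)} {i j : Int} (h : pvReach b i j) :
    pvWhite b i j := by
  cases h with
  | boundary _ _ hw _ => exact hw
  | step _ _ _ _ _ _ hw => exact hw

theorem pvA_char (b : List (List String)) (hpre : Pre_paint_enclosed_whites_to_blacks b) :
    ∀ i j : Int, 0 ≤ i → 0 ≤ j →
      (pvVget ((get_boundary_whites b).foldl (fun v item => bfs b item v)
        (get_init_visited b)) i j = true ↔ pvReach b i j) := by
  obtain ⟨k1, k2, k3, k4, k5⟩ := pvbws_fold_spec b (get_boundary_whites b) (get_init_visited b)
    (fun p hp => (pv_mem_bws b hpre p).1 hp) (pv_init_shape b)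
    (fun i j _ _ h => absurd h (pv_init_false' b i j))
    (fun i j _ _ h => absurd h (pv_init_false' b i j))
  have haux : ∀ i j : Int, pvReach b i j →
      pvVget ((get_boundary_whites b).foldl (fun v item => bfs b item v)
        (get_init_visited b)) i j = true := by
    intro i j hr
    induction hr with
    | boundary i j hw hbd => exact k5 (i, j) ((pv_mem_bws b hpre (i, j)).2 ⟨hw, hbd⟩)
    | step i j di dj hr hd hw ih =>
      have hww := pvReach_white hr
      exact k3 i j hww.1.1 hww.1.2.2.1 ih (by simp) (di, dj) hd hw
  intro i j hi hj
  exact ⟨fun h => k2 i j hi hj h, fun h => haux i j h⟩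

-- ---- B side: union-find theory ----

-- the equivalence closure of the processed union pairs
inductive pvConn (U : List (Nat × Nat)) : Nat → Nat → Prop
  | base {a b : Nat} : (a, b) ∈ U → pvConn U a b
  | refl (x : Nat) : pvConn U x x
  | symm {x y : Nat} : pvConn U x y → pvConn U y x
  | trans {x y z : Nat} : pvConn U x y → pvConn U y z → pvConn U x z

-- forest invariant: parent chains strictly increase below n (union by larger index)
def pvInv (n : Nat) (parent : List Nat) : Prop :=
  parent.length = n ∧ ∀ k, k < n → k ≤ pvPar parent k ∧ pvPar parent k < n

-- full invariant: root equality is exactly connectivity via the processed pairs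
def pvInvR (n : Nat) (parent : List Nat) (U : List (Nat × Nat)) : Prop :=
  pvInv n parent ∧ ∀ a b : Nat, a < n → b < n →
    (uf_find parent n a = uf_find parent n b ↔ pvConn U a b)

theorem uf_find_root (parent : List Nat) {k : Nat} (h : pvPar parent k = k) :
    ∀ f, uf_find parent f k = k := by
  intro f
  cases f with
  | zero => rfl
  | succ f => simp [uf_find, h]

theorem uf_find_step (parent : List Nat) {k : Nat} (h : pvPar parent k ≠ k) (f : Nat) :
    uf_find parent (f + 1) k = uf_find parent f (pvPar parent k) := by
  simp [uf_find, h]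

theorem uf_find_fix {n : Nat} {parent : List Nat} (hinv : pvInv n parent) :
    ∀ (f k : Nat), k < n → n ≤ k + f →
      k ≤ uf_find parent f k ∧ uf_find parent f k < n ∧
      pvPar parent (uf_find parent f k) = uf_find parent f k := by
  intro f
  induction f with
  | zero => intro k hk hf; omega
  | succ f ih =>
    intro k hk hf
    by_cases hfix : pvPar parent k = k
    · rw [uf_find_root parent hfix]
      exact ⟨le_refl _, hk, hfix⟩
    · rw [uf_find_step parent hfix]
      obtain ⟨h1, h2⟩ := hinv.2 k hk
      have := ih (pvPar parent k) h2 (by omega)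
      exact ⟨by omega, this.2.1, this.2.2⟩

theorem uf_find_fuel {n : Nat} {parent : List Nat} (hinv : pvInv n parent) :
    ∀ (f k : Nat), k < n → n ≤ k + f →
      uf_find parent (f + 1) k = uf_find parent f k := by
  intro f
  induction f with
  | zero => intro k hk hf; omega
  | succ f ih =>
    intro k hk hf
    by_cases hfix : pvPar parent k = k
    · rw [uf_find_root parent hfix, uf_find_root parent hfix]
    · rw [uf_find_step parent hfix, uf_find_step parent hfix]
      obtain ⟨h1, h2⟩ := hinv.2 k hk
      exact ih (pvPar parent k) h2 (by omega)

theorem uf_find_fuel_ge {n : Nat} {parent : List Nat} (hinv : pvInv n parent)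
    (f f' k : Nat) (hk : k < n) (hf : n ≤ k + f) (hff : f ≤ f') :
    uf_find parent f' k = uf_find parent f k := by
  induction f' with
  | zero =>
    have : f = 0 := by omega
    rw [this]
  | succ f' ih =>
    rcases Nat.eq_or_lt_of_le hff with rfl | hlt
    · rfl
    · have hf' : f ≤ f' := by omega
      rw [uf_find_fuel hinv f' k hk (by omega), ih hf']

-- pvPar after a set at a position < length
theorem pvPar_set (parent : List Nat) (r v k : Nat) (hr : r < parent.length) :
    pvPar (parent.set r v) k = if k = r then v else pvPar parent k := by
  unfold pvPar
  by_cases hk : k = r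
  · subst hk
    simp [List.getD, List.getElem?_set_self hr]
  · simp [List.getD, List.getElem?_set_ne (fun h => hk h.symm), hk]

-- root after redirecting root ra to root rb (ra < rb): redirected class only
theorem uf_root_set {n : Nat} {parent : List Nat} (hinv : pvInv n parent)
    {ra rb : Nat} (hra : ra < n) (hrb : rb < n)
    (hfa : pvPar parent ra = ra) (hfb : pvPar parent rb = rb) (hlt : ra < rb) :
    pvInv n (parent.set ra rb) ∧
    ∀ k, k < n → uf_find (parent.set ra rb) n k =
      (if uf_find parent n k = ra then rb else uf_find parent n k) := by
  have hlen : parent.length = n := hinv.1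
  have hrlen : ra < parent.length := by omega
  have hinv' : pvInv n (parent.set ra rb) := by
    refine ⟨by simpa using hlen, ?_⟩
    intro k hk
    rw [pvPar_set parent ra rb k hrlen]
    by_cases hkr : k = ra
    · simp [hkr]; omega
    · simp only [hkr, if_false]
      exact hinv.2 k hk
  refine ⟨hinv', ?_⟩
  have main : ∀ m, ∀ k, k < n → n - k ≤ m →
      uf_find (parent.set ra rb) n k =
        (if uf_find parent n k = ra then rb else uf_find parent n k) := by
    intro m
    induction m with
    | zero => intro k hk hm; omega
    | succ m ih =>
      intro k hk hm
      by_cases hkr : k = ra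
      · subst hkr
        have hpar' : pvPar (parent.set k rb) k = rb := by
          rw [pvPar_set parent k rb k hrlen]; simp
        have hne : pvPar (parent.set k rb) k ≠ k := by omega
        have hstep : uf_find (parent.set k rb) n k =
            uf_find (parent.set k rb) (n - 1) rb := by
          conv_lhs => rw [show n = (n - 1) + 1 by omega]
          rw [uf_find_step _ hne, hpar']
        have hfb' : pvPar (parent.set k rb) rb = rb := by
          rw [pvPar_set parent k rb rb hrlen]
          simp only [if_neg (by omega : rb ≠ k)]
          exact hfb
        rw [hstep, uf_find_root _ hfb', uf_find_root parent hfa]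
        simp
      · by_cases hfix : pvPar parent k = k
        · have hfix' : pvPar (parent.set ra rb) k = k := by
            rw [pvPar_set parent ra rb k hrlen, if_neg hkr]; exact hfix
          rw [uf_find_root _ hfix', uf_find_root parent hfix, if_neg hkr]
        · obtain ⟨h1, h2⟩ := hinv.2 k hk
          have hmlt : k < pvPar parent k := by omega
          have hpar' : pvPar (parent.set ra rb) k = pvPar parent k := by
            rw [pvPar_set parent ra rb k hrlen, if_neg hkr]
          have hs1' : uf_find parent n k = uf_find parent n (pvPar parent k) := by
            conv_lhs => rw [show n = (n - 1) + 1 by omega, uf_find_step parent hfix]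
            exact uf_find_fuel_ge hinv (n - 1) n (pvPar parent k) h2 (by omega) (by omega) ▸ rfl
          have hfix2 : pvPar (parent.set ra rb) k ≠ k := by
            rw [hpar']; exact hfix
          have hs2 : uf_find (parent.set ra rb) n k =
              uf_find (parent.set ra rb) n (pvPar parent k) := by
            conv_lhs => rw [show n = (n - 1) + 1 by omega, uf_find_step _ hfix2]
            rw [hpar']
            exact (uf_find_fuel_ge hinv' (n - 1) n (pvPar parent k) h2 (by omega)
              (by omega)).symm
          rw [hs2, hs1']
          exact ih (pvPar parent k) h2 (by omega)
  exact fun k hk => main n k hk (by omega)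

-- ---- closure lemmas ----
theorem pvConn_mono {U V : List (Nat × Nat)} {x y : Nat} (h : pvConn U x y) :
    pvConn (U ++ V) x y := by
  induction h with
  | base hm => exact pvConn.base (List.mem_append.2 (Or.inl hm))
  | refl x => exact pvConn.refl x
  | symm _ ih => exact pvConn.symm ih
  | trans _ _ ih1 ih2 => exact pvConn.trans ih1 ih2

theorem pvConn_append_single {U : List (Nat × Nat)} {a b x y : Nat} :
    pvConn (U ++ [(a, b)]) x y ↔
      (pvConn U x y ∨ (pvConn U x a ∧ pvConn U b y) ∨ (pvConn U x b ∧ pvConn U a y)) := by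
  constructor
  · intro h
    induction h with
    | @base u v hm =>
      rcases List.mem_append.1 hm with hm | hm
      · exact Or.inl (pvConn.base hm)
      · simp only [List.mem_singleton, Prod.mk.injEq] at hm
        obtain ⟨rfl, rfl⟩ := hm
        exact Or.inr (Or.inl ⟨pvConn.refl _, pvConn.refl _⟩)
    | refl x => exact Or.inl (pvConn.refl x)
    | @symm u v _ ih =>
      rcases ih with h | ⟨h1, h2⟩ | ⟨h1, h2⟩
      · exact Or.inl h.symm
      · exact Or.inr (Or.inr ⟨h2.symm, h1.symm⟩)
      · exact Or.inr (Or.inl ⟨h2.symm, h1.symm⟩)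
    | @trans u v w _ _ ih1 ih2 =>
      rcases ih1 with h1 | ⟨h1, h1'⟩ | ⟨h1, h1'⟩ <;>
        rcases ih2 with h2 | ⟨h2, h2'⟩ | ⟨h2, h2'⟩
      · exact Or.inl (h1.trans h2)
      · exact Or.inr (Or.inl ⟨h1.trans h2, h2'⟩)
      · exact Or.inr (Or.inr ⟨h1.trans h2, h2'⟩)
      · exact Or.inr (Or.inl ⟨h1, h1'.trans h2⟩)
      · exact Or.inl (h1.trans ((h2.symm.trans h1'.symm).trans h2'))
      · exact Or.inl (h1.trans h2')
      · exact Or.inr (Or.inr ⟨h1, h1'.trans h2⟩)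
      · exact Or.inl (h1.trans h2')
      · exact Or.inl (h1.trans ((h2.symm.trans h1'.symm).trans h2'))
  · rintro (h | ⟨h1, h2⟩ | ⟨h1, h2⟩)
    · exact pvConn_mono h
    · exact (pvConn_mono h1).trans ((pvConn.base (List.mem_append.2 (Or.inr (by simp)))).trans
        (pvConn_mono h2))
    · exact (pvConn_mono h1).trans ((pvConn.symm (pvConn.base
        (List.mem_append.2 (Or.inr (by simp))))).trans (pvConn_mono h2))

theorem pvConn_nil {x y : Nat} (h : pvConn [] x y) : x = y := by
  induction h with
  | base hm => simp at hm
  | refl x => rfl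
  | symm _ ih => omega
  | trans _ _ ih1 ih2 => omega

-- ---- the union step ----
theorem uf_union_aux {n : Nat} {parent : List Nat} {U : List (Nat × Nat)}
    (hinv : pvInv n parent)
    (hiff : ∀ x y : Nat, x < n → y < n →
      (uf_find parent n x = uf_find parent n y ↔ pvConn U x y))
    {a b : Nat} (ha : a < n) (hb : b < n)
    (hlt : uf_find parent n a < uf_find parent n b) :
    pvInv n (parent.set (uf_find parent n a) (uf_find parent n b)) ∧
    ∀ x y : Nat, x < n → y < n →
      (uf_find (parent.set (uf_find parent n a) (uf_find parent n b)) n x =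
        uf_find (parent.set (uf_find parent n a) (uf_find parent n b)) n y ↔
        pvConn (U ++ [(a, b)]) x y) := by
  obtain ⟨haA, haB, haC⟩ := uf_find_fix hinv n a ha (by omega)
  obtain ⟨hbA, hbB, hbC⟩ := uf_find_fix hinv n b hb (by omega)
  obtain ⟨hinv', hroot⟩ := uf_root_set hinv haB hbB haC hbC hlt
  refine ⟨hinv', ?_⟩
  intro x y hx hy
  have hxa : ∀ z, z < n →
      (uf_find parent n z = uf_find parent n a ↔ pvConn U z a) := fun z hz => hiff z a hz ha
  have hxb : ∀ z, z < n →
      (uf_find parent n z = uf_find parent n b ↔ pvConn U z b) := fun z hz => hiff z b hz hb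
  rw [hroot x hx, hroot y hy, pvConn_append_single]
  by_cases hx1 : uf_find parent n x = uf_find parent n a <;>
    by_cases hy1 : uf_find parent n y = uf_find parent n a
  · rw [if_pos hx1, if_pos hy1]
    simp only [true_iff]
    exact Or.inl ((hiff x y hx hy).1 (hx1.trans hy1.symm))
  · rw [if_pos hx1, if_neg hy1]
    constructor
    · intro h
      exact Or.inr (Or.inl ⟨(hxa x hx).1 hx1, ((hxb y hy).1 h.symm).symm⟩)
    · rintro (h | ⟨h1, h2⟩ | ⟨h1, h2⟩)
      · exact absurd (((hiff x y hx hy).2 h).symm.trans hx1) hy1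
      · exact ((hxb y hy).2 h2.symm).symm
      · exact absurd (((hxa y hy).2 h2.symm)) (fun hc => hy1 hc)
  · rw [if_neg hx1, if_pos hy1]
    constructor
    · intro h
      exact Or.inr (Or.inr ⟨(hxb x hx).1 h, ((hxa y hy).1 hy1).symm⟩)
    · rintro (h | ⟨h1, h2⟩ | ⟨h1, h2⟩)
      · exact absurd (((hiff x y hx hy).2 h).trans hy1) hx1
      · exact absurd ((hxa x hx).2 h1) hx1
      · exact (hxb x hx).2 h1
  · rw [if_neg hx1, if_neg hy1]
    constructor
    · intro h
      exact Or.inl ((hiff x y hx hy).1 h)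
    · rintro (h | ⟨h1, h2⟩ | ⟨h1, h2⟩)
      · exact (hiff x y hx hy).2 h
      · exact absurd ((hxa x hx).2 h1) hx1
      · exact absurd ((hxa y hy).2 h2.symm) hy1
  
theorem pvConn_pair_comm {U : List (Nat × Nat)} {a b x y : Nat} :
    pvConn (U ++ [(a, b)]) x y ↔ pvConn (U ++ [(b, a)]) x y := by
  rw [pvConn_append_single, pvConn_append_single]
  tauto

theorem uf_union_invR {n : Nat} {parent : List Nat} {U : List (Nat × Nat)}
    (h : pvInvR n parent U) {a b : Nat} (ha : a < n) (hb : b < n) :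
    pvInvR n (uf_union parent a b) (U ++ [(a, b)]) := by
  obtain ⟨hinv, hiff⟩ := h
  have hlen : parent.length = n := hinv.1
  unfold uf_union
  rw [hlen]
  by_cases hcase1 : uf_find parent n a < uf_find parent n b
  · rw [if_pos hcase1]
    obtain ⟨h1, h2⟩ := uf_union_aux hinv hiff ha hb hcase1
    exact ⟨h1, h2⟩
  · rw [if_neg hcase1]
    by_cases hcase2 : uf_find parent n b < uf_find parent n a
    · rw [if_pos hcase2]
      obtain ⟨h1, h2⟩ := uf_union_aux hinv hiff hb ha hcase2
      refine ⟨h1, ?_⟩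
      intro x y hx hy
      rw [pvConn_pair_comm]
      exact h2 x y hx hy
    · rw [if_neg hcase2]
      have heq : uf_find parent n a = uf_find parent n b := by omega
      have hab : pvConn U a b := (hiff a b ha hb).1 heq
      refine ⟨hinv, ?_⟩
      intro x y hx hy
      rw [pvConn_append_single]
      constructor
      · intro h
        exact Or.inl ((hiff x y hx hy).1 h)
      · rintro (h | ⟨h1, h2⟩ | ⟨h1, h2⟩)
        · exact (hiff x y hx hy).2 h
        · exact (hiff x y hx hy).2 ((h1.trans hab).trans h2)
        · exact (hiff x y hx hy).2 ((h1.trans hab.symm).trans h2)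

-- ---- the fold over all union calls ----
theorem uf_fold_invR {n : Nat} :
    ∀ (U' : List (Nat × Nat)) (parent : List Nat) (U : List (Nat × Nat)),
      (∀ p ∈ U', p.1 < n ∧ p.2 < n) → pvInvR n parent U →
      pvInvR n (U'.foldl (fun p c => uf_union p c.1 c.2) parent) (U ++ U') := by
  intro U'
  induction U' with
  | nil => intro parent U _ h; simpa using h
  | cons c U' ih =>
    intro parent U hbd h
    obtain ⟨hc1, hc2⟩ := hbd c List.mem_cons_self
    have hstep := uf_union_invR h hc1 hc2
    have := ih (uf_union parent c.1 c.2) (U ++ [(c.1, c.2)])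
      (fun p hp => hbd p (List.mem_cons_of_mem _ hp)) hstep
    simpa [List.append_assoc] using this

theorem uf_init_invR (n : Nat) : pvInvR n (List.range n) [] := by
  have hpar : ∀ k, k < n → pvPar (List.range n) k = k := by
    intro k hk
    unfold pvPar
    simp [List.getD, hk]
  refine ⟨⟨by simp, fun k hk => by rw [hpar k hk]; omega⟩, ?_⟩
  intro a b ha hb
  rw [uf_find_root _ (hpar a ha), uf_find_root _ (hpar b hb)]
  constructor
  · rintro rfl
    exact pvConn.refl a
  · intro h
    exact pvConn_nil h

-- ---- the cell grid and id arithmetic ----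
theorem mem_pvCellsN {rows cols : Nat} {c : Nat × Nat} :
    c ∈ pvCellsN rows cols ↔ c.1 < rows ∧ c.2 < cols := by
  obtain ⟨x, y⟩ := c
  unfold pvCellsN
  constructor
  · intro h
    obtain ⟨i, hi, hm⟩ := List.mem_flatMap.1 h
    obtain ⟨j, hj, hji⟩ := List.mem_map.1 hm
    rcases Prod.mk.inj hji.symm with ⟨rfl, rfl⟩
    rw [List.mem_range] at hi hj
    exact ⟨hi, hj⟩
  · rintro ⟨h1, h2⟩
    exact List.mem_flatMap.2 ⟨x, List.mem_range.2 h1,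
      List.mem_map.2 ⟨y, List.mem_range.2 h2, rfl⟩⟩

theorem pvId_lt {rows cols i j : Nat} (hi : i < rows) (hj : j < cols) :
    i * cols + j < rows * cols := by
  have h1 : (i + 1) * cols ≤ rows * cols := Nat.mul_le_mul_right _ (by omega)
  have h2 : (i + 1) * cols = i * cols + cols := by ring
  omega

theorem pvId_inj {cols i j i' j' : Nat} (hj : j < cols) (hj' : j' < cols)
    (h : i * cols + j = i' * cols + j') : i = i' ∧ j = j' := by
  have hc : 0 < cols := by omega
  have e1 : (i * cols + j) / cols = i := by
    rw [Nat.mul_comm, Nat.mul_add_div hc, Nat.div_eq_of_lt hj]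
    omega
  have e2 : (i' * cols + j') / cols = i' := by
    rw [Nat.mul_comm, Nat.mul_add_div hc, Nat.div_eq_of_lt hj']
    omega
  have hii : i = i' := by rw [← e1, ← e2, h]
  subst hii
  exact ⟨rfl, by omega⟩

theorem mem_pvUnionPairs {bd : List (List String)} {rows cols : Nat} {p : Nat × Nat} :
    p ∈ pvUnionPairs bd rows cols ↔
      ∃ i j : Nat, i < rows ∧ j < cols ∧ pvCellN bd i j = "W" ∧
        ((i + 1 < rows ∧ pvCellN bd (i + 1) j = "W" ∧ p = (i * cols + j, (i + 1) * cols + j)) ∨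
         (j + 1 < cols ∧ pvCellN bd i (j + 1) = "W" ∧ p = (i * cols + j, i * cols + j + 1))) := by
  unfold pvUnionPairs
  rw [List.mem_flatMap]
  constructor
  · rintro ⟨c, hc, hm⟩
    obtain ⟨hc1, hc2⟩ := mem_pvCellsN.1 hc
    by_cases hw : pvCellN bd c.1 c.2 = "W"
    · rw [if_pos hw] at hm
      rcases List.mem_append.1 hm with h | h
      · split at h
        · rename_i hcond
          simp only [List.mem_singleton] at h
          exact ⟨c.1, c.2, hc1, hc2, hw, Or.inl ⟨hcond.1, hcond.2, h⟩⟩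
        · simp at h
      · split at h
        · rename_i hcond
          simp only [List.mem_singleton] at h
          exact ⟨c.1, c.2, hc1, hc2, hw, Or.inr ⟨hcond.1, hcond.2, h⟩⟩
        · simp at h
    · rw [if_neg hw] at hm
      simp at hm
  · rintro ⟨i, j, hi, hj, hw, hcase⟩
    refine ⟨(i, j), mem_pvCellsN.2 ⟨hi, hj⟩, ?_⟩
    rw [if_pos hw]
    rcases hcase with ⟨h1, h2, rfl⟩ | ⟨h1, h2, rfl⟩
    · exact List.mem_append.2 (Or.inl (by rw [if_pos ⟨h1, h2⟩]; simp))
    · exact List.mem_append.2 (Or.inr (by rw [if_pos ⟨h1, h2⟩]; simp))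

theorem pvUnionPairs_lt {bd : List (List String)} {rows cols : Nat} {p : Nat × Nat}
    (hp : p ∈ pvUnionPairs bd rows cols) : p.1 < rows * cols ∧ p.2 < rows * cols := by
  obtain ⟨i, j, hi, hj, _, hcase⟩ := mem_pvUnionPairs.1 hp
  rcases hcase with ⟨h1, _, rfl⟩ | ⟨h1, _, rfl⟩
  · exact ⟨pvId_lt hi hj, pvId_lt h1 hj⟩
  · exact ⟨pvId_lt hi hj, pvId_lt hi h1⟩

-- ---- relating connectivity of union pairs to A's reachability ----
theorem pvReach_step' {bd : List (List String)} {x y x' y' : Int} (h : pvReach bd x y)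
    (hd : (x' - x, y' - y) ∈ pvDpos) (hw : pvWhite bd x' y') : pvReach bd x' y' := by
  have := pvReach.step x y (x' - x) (y' - y) h hd
    (by rw [show x + (x' - x) = x' by ring, show y + (y' - y) = y' by ring]; exact hw)
  rwa [show x + (x' - x) = x' by ring, show y + (y' - y) = y' by ring] at this

theorem pvReach_iff_adj {bd : List (List String)} {x y x' y' : Int}
    (hw : pvWhite bd x y) (hw' : pvWhite bd x' y')
    (hd : (x' - x, y' - y) ∈ pvDpos) (hd' : (x - x', y - y') ∈ pvDpos) :
    (pvReach bd x y ↔ pvReach bd x' y') :=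
  ⟨fun h => pvReach_step' h hd hw', fun h => pvReach_step' h hd' hw⟩

theorem pvWhiteN (bd : List (List String)) {i j : Nat} (hi : i < pvR bd) (hj : j < pvC bd)
    (hw : pvCellN bd i j = "W") : pvWhite bd (i : Int) (j : Int) :=
  ⟨⟨by omega, by omega, by omega, by omega⟩, hw⟩

-- cells of equal union-find class are equal or both white with the same reachability
def pvRelB (bd : List (List String)) (x y : Nat) : Prop :=
  x = y ∨ ∃ i j i' j' : Nat, i < pvR bd ∧ j < pvC bd ∧ i' < pvR bd ∧ j' < pvC bd ∧
    x = i * pvC bd + j ∧ y = i' * pvC bd + j' ∧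
    pvCellN bd i j = "W" ∧ pvCellN bd i' j' = "W" ∧
    (pvReach bd (i : Int) (j : Int) ↔ pvReach bd (i' : Int) (j' : Int))

theorem pvConn_rel (bd : List (List String)) {x y : Nat}
    (h : pvConn (pvUnionPairs bd (pvR bd) (pvC bd)) x y) : pvRelB bd x y := by
  induction h with
  | @base a b hm =>
    obtain ⟨i, j, hi, hj, hw, hcase⟩ := mem_pvUnionPairs.1 hm
    rcases hcase with ⟨h1, h2, hp⟩ | ⟨h1, h2, hp⟩
    · obtain ⟨ha, hb⟩ := Prod.mk.inj hp
      subst ha; subst hb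
      refine Or.inr ⟨i, j, i + 1, j, hi, hj, h1, hj, rfl, rfl, hw, h2, ?_⟩
      refine pvReach_iff_adj (pvWhiteN bd hi hj hw) (pvWhiteN bd h1 hj h2) ?_ ?_ <;>
        · simp only [pvDpos, List.mem_cons, List.not_mem_nil, or_false, Prod.mk.injEq]
          push_cast
          omega
    · obtain ⟨ha, hb⟩ := Prod.mk.inj hp
      subst ha; subst hb
      refine Or.inr ⟨i, j, i, j + 1, hi, hj, hi, h1, rfl, rfl, hw, h2, ?_⟩
      refine pvReach_iff_adj (pvWhiteN bd hi hj hw) (pvWhiteN bd hi h1 h2) ?_ ?_ <;>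
        · simp only [pvDpos, List.mem_cons, List.not_mem_nil, or_false, Prod.mk.injEq]
          push_cast
          omega
  | refl x => exact Or.inl rfl
  | symm _ ih =>
    rcases ih with rfl | ⟨i, j, i', j', a1, a2, a3, a4, a5, a6, a7, a8, a9⟩
    · exact Or.inl rfl
    · exact Or.inr ⟨i', j', i, j, a3, a4, a1, a2, a6, a5, a8, a7, a9.symm⟩
  | trans _ _ ih1 ih2 =>
    rcases ih1 with rfl | ⟨i1, j1, i2, j2, a1, a2, a3, a4, a5, a6, a7, a8, a9⟩
    · exact ih2
    · rcases ih2 with rfl | ⟨i3, j3, i4, j4, b1, b2, b3, b4, b5, b6, b7, b8, b9⟩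
      · exact Or.inr ⟨i1, j1, i2, j2, a1, a2, a3, a4, a5, a6, a7, a8, a9⟩
      · obtain ⟨hii, hjj⟩ := pvId_inj a4 b2 (a6.symm.trans b5)
        subst hii; subst hjj
        exact Or.inr ⟨i1, j1, i4, j4, a1, a2, b3, b4, a5, b6, a7, b8, a9.trans b9⟩

-- the final parent array and boundary-white list of B (definitionally the port's lets)
def pvParentB (bd : List (List String)) : List Nat :=
  (pvUnionPairs bd (pvR bd) (pvC bd)).foldl (fun p c => uf_union p c.1 c.2)
    (List.range (pvR bd * pvC bd))

def pvBwsB (bd : List (List String)) : List (Nat × Nat) :=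
  (pvCellsN (pvR bd) (pvC bd)).filter (fun c =>
    decide (pvCellN bd c.1 c.2 = "W" ∧
      (c.1 = 0 ∨ c.1 = pvR bd - 1 ∨ c.2 = 0 ∨ c.2 = pvC bd - 1)))

theorem mem_pvBwsB {bd : List (List String)} {c : Nat × Nat} :
    c ∈ pvBwsB bd ↔ c.1 < pvR bd ∧ c.2 < pvC bd ∧ pvCellN bd c.1 c.2 = "W" ∧
      (c.1 = 0 ∨ c.1 = pvR bd - 1 ∨ c.2 = 0 ∨ c.2 = pvC bd - 1) := by
  unfold pvBwsB
  rw [List.mem_filter, mem_pvCellsN]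
  simp only [decide_eq_true_eq]
  tauto

theorem pvBoundaryN (bd : List (List String)) {i j : Nat} (hi : i < pvR bd) (hj : j < pvC bd)
    (h : i = 0 ∨ i = pvR bd - 1 ∨ j = 0 ∨ j = pvC bd - 1) :
    pvBoundary bd (i : Int) (j : Int) := by
  unfold pvBoundary
  omega

theorem pvParentB_invR (bd : List (List String)) :
    pvInvR (pvR bd * pvC bd) (pvParentB bd) (pvUnionPairs bd (pvR bd) (pvC bd)) := by
  have h := uf_fold_invR (pvUnionPairs bd (pvR bd) (pvC bd))
    (List.range (pvR bd * pvC bd)) []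
    (fun p hp => pvUnionPairs_lt hp) (uf_init_invR (pvR bd * pvC bd))
  simpa [pvParentB] using h

theorem pvB_char (bd : List (List String))
    (i j : Nat) (hi : i < pvR bd) (hj : j < pvC bd) (hw : pvCellN bd i j = "W") :
    (uf_find (pvParentB bd) (pvParentB bd).length (i * pvC bd + j) ∈
      PySem.Set.ofList ((pvBwsB bd).map (fun c =>
        uf_find (pvParentB bd) (pvParentB bd).length (c.1 * pvC bd + c.2)))) ↔
    pvReach bd (i : Int) (j : Int) := by
  obtain ⟨hinv, hiff⟩ := pvParentB_invR bd
  have hPlen : (pvParentB bd).length = pvR bd * pvC bd := hinv.1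
  rw [hPlen, PySem.Set.mem_ofList, List.mem_map]
  constructor
  · rintro ⟨c, hc, heq⟩
    obtain ⟨hc1, hc2, hcw, hcb⟩ := mem_pvBwsB.1 hc
    have hconn := (hiff _ _ (pvId_lt hc1 hc2) (pvId_lt hi hj)).1 heq
    have hreach_c : pvReach bd (c.1 : Int) (c.2 : Int) :=
      pvReach.boundary _ _ (pvWhiteN bd hc1 hc2 hcw) (pvBoundaryN bd hc1 hc2 hcb)
    rcases pvConn_rel bd hconn with hid | ⟨i1, j1, i2, j2, b1, b2, b3, b4, b5, b6, b7, b8, b9⟩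
    · obtain ⟨hii, hjj⟩ := pvId_inj hc2 hj hid
      rw [← hii, ← hjj]
      exact hreach_c
    · obtain ⟨e1, e2⟩ := pvId_inj b2 hc2 (b5.symm)
      obtain ⟨e3, e4⟩ := pvId_inj b4 hj (b6.symm)
      subst e1; subst e2; subst e3; subst e4
      exact b9.1 hreach_c
  · intro hr
    have haux : ∀ (x y : Int), pvReach bd x y → ∃ c, c ∈ pvBwsB bd ∧
        pvConn (pvUnionPairs bd (pvR bd) (pvC bd))
          (c.1 * pvC bd + c.2) (x.toNat * pvC bd + y.toNat) := by
      intro x y hxy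
      induction hxy with
      | boundary x y hwb hbb =>
        obtain ⟨⟨g1, g2, g3, g4⟩, g5⟩ := hwb
        refine ⟨(x.toNat, y.toNat), ?_, pvConn.refl _⟩
        refine mem_pvBwsB.2 ⟨by omega, by omega, ?_, ?_⟩
        · show pvCell bd ((x.toNat : Nat) : Int) ((y.toNat : Nat) : Int) = "W"
          rw [Int.toNat_of_nonneg g1, Int.toNat_of_nonneg g3]
          exact g5
        · unfold pvBoundary at hbb
          omega
      | step x y dx dy hprev hd hwn ih =>
        obtain ⟨c, hc, hconn⟩ := ih
        obtain ⟨⟨o1, o2, o3, o4⟩, o5⟩ := pvReach_white hprev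
        obtain ⟨⟨n1, n2, n3, n4⟩, n5⟩ := hwn
        have hcellO : pvCellN bd x.toNat y.toNat = "W" := by
          show pvCell bd ((x.toNat : Nat) : Int) ((y.toNat : Nat) : Int) = "W"
          rw [Int.toNat_of_nonneg o1, Int.toNat_of_nonneg o3]
          exact o5
        have hcellN : pvCellN bd (x + dx).toNat (y + dy).toNat = "W" := by
          show pvCell bd (((x + dx).toNat : Nat) : Int) (((y + dy).toNat : Nat) : Int) = "W"
          rw [Int.toNat_of_nonneg n1, Int.toNat_of_nonneg n3]
          exact n5
        have hd' : (dx = -1 ∧ dy = 0) ∨ (dx = 0 ∧ dy = 1) ∨ (dx = 1 ∧ dy = 0) ∨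
            (dx = 0 ∧ dy = -1) := by
          simpa only [pvDpos, List.mem_cons, List.not_mem_nil, or_false, Prod.mk.injEq] using hd
        have hedge : pvConn (pvUnionPairs bd (pvR bd) (pvC bd))
            (x.toNat * pvC bd + y.toNat) ((x + dx).toNat * pvC bd + (y + dy).toNat) := by
          rcases hd' with ⟨rfl, rfl⟩ | ⟨rfl, rfl⟩ | ⟨rfl, rfl⟩ | ⟨rfl, rfl⟩
          · -- d = (-1, 0): the target cell is one row up
            rw [show (x + (-1)).toNat = x.toNat - 1 by omega,
              show (y + (0 : Int)).toNat = y.toNat by omega] at hcellN ⊢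
            have hbase := pvConn.base (U := pvUnionPairs bd (pvR bd) (pvC bd))
              (mem_pvUnionPairs.2 ⟨x.toNat - 1, y.toNat, by omega, by omega, hcellN,
                Or.inl ⟨by omega,
                  by rw [show x.toNat - 1 + 1 = x.toNat by omega]; exact hcellO, rfl⟩⟩)
            rw [show x.toNat - 1 + 1 = x.toNat by omega] at hbase
            exact hbase.symm
          · -- d = (0, 1): the target cell is one column right
            rw [show (x + (0 : Int)).toNat = x.toNat by omega,
              show (y + 1).toNat = y.toNat + 1 by omega] at hcellN ⊢
            rw [← Nat.add_assoc]
            exact pvConn.base (mem_pvUnionPairs.2 ⟨x.toNat, y.toNat, by omega, by omega,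
              hcellO, Or.inr ⟨by omega, hcellN, rfl⟩⟩)
          · -- d = (1, 0): the target cell is one row down
            rw [show (x + 1).toNat = x.toNat + 1 by omega,
              show (y + (0 : Int)).toNat = y.toNat by omega] at hcellN ⊢
            exact pvConn.base (mem_pvUnionPairs.2 ⟨x.toNat, y.toNat, by omega, by omega,
              hcellO, Or.inl ⟨by omega, hcellN, rfl⟩⟩)
          · -- d = (0, -1): the target cell is one column left
            rw [show (x + (0 : Int)).toNat = x.toNat by omega,
              show (y + (-1)).toNat = y.toNat - 1 by omega] at hcellN ⊢
            have hbase := pvConn.base (U := pvUnionPairs bd (pvR bd) (pvC bd))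
              (mem_pvUnionPairs.2 ⟨x.toNat, y.toNat - 1, by omega, by omega, hcellN,
                Or.inr ⟨by omega,
                  by rw [show y.toNat - 1 + 1 = y.toNat by omega]; exact hcellO, rfl⟩⟩)
            rw [Nat.add_assoc, show y.toNat - 1 + 1 = y.toNat by omega] at hbase
            exact hbase.symm
        exact ⟨c, hc, hconn.trans hedge⟩
    obtain ⟨c, hc, hconn⟩ := haux (i : Int) (j : Int) hr
    rw [Int.toNat_natCast, Int.toNat_natCast] at hconn
    obtain ⟨hc1, hc2, _, _⟩ := mem_pvBwsB.1 hc
    exact ⟨c, hc, (hiff _ _ (pvId_lt hc1 hc2) (pvId_lt hi hj)).2 hconn⟩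

-- ===== VERDICT (by name: the statement is the Claim_ definition above) =====
theorem paint_enclosed_whites_to_blacks_spec : Claim_equal_paint_enclosed_whites_to_blacks := by
  intro b hdom hpre
  unfold Spec_paint_enclosed_whites_to_blacks
  have halt : paint_enclosed_whites_to_blacks_alt b =
      b.mapIdx (fun i row => row.mapIdx (fun j cell =>
        if j < pvC b ∧ cell = "W" ∧
            uf_find (pvParentB b) (pvParentB b).length (i * pvC b + j) ∉
              PySem.Set.ofList ((pvBwsB b).map (fun c =>
                uf_find (pvParentB b) (pvParentB b).length (c.1 * pvC b + c.2)))
        then "B" else cell)) := rfl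
  rw [halt]
  unfold paint_enclosed_whites_to_blacks
  dsimp only
  have hAchar := pvA_char b hpre
  refine List.ext_getElem (by simp) ?_
  intro i hi1 hi2
  simp only [List.getElem_mapIdx]
  refine List.ext_getElem (by simp) ?_
  intro j hj1 hj2
  simp only [List.getElem_mapIdx]
  rw [List.length_mapIdx] at hi1 hj1
  have hiR : i < b.length := hi1
  have hjrow : j < b[i].length := by simpa using hj1
  by_cases hW : b[i][j] = "W"
  · by_cases hjC : j < pvC b
    · have hcellW : pvCellN b i j = "W" := by
        show pvCell b (i : Int) (j : Int) = "W"
        rw [pvCell_getElem b i j hiR hjrow]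
        exact hW
      have hBiff := pvB_char b i j hiR hjC hcellW
      have hAiff := hAchar (i : Int) (j : Int) (by omega) (by omega)
      by_cases hr : pvReach b (i : Int) (j : Int)
      · rw [if_neg, if_neg]
        · rintro ⟨_, _, hnin⟩
          exact hnin (hBiff.2 hr)
        · rintro ⟨_, hfalse⟩
          rw [hAiff.2 hr] at hfalse
          simp at hfalse
      · rw [if_pos, if_pos]
        · exact ⟨hjC, hW, fun hmem => hr (hBiff.1 hmem)⟩
        · refine ⟨hW, ?_⟩
          rcases Bool.eq_false_or_eq_true (pvVget ((get_boundary_whites b).foldl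
            (fun v item => bfs b item v) (get_init_visited b)) (i : Int) (j : Int)) with h | h
          · exact absurd (hAiff.1 h) hr
          · exact h
    · exact absurd hW (pv_noW b hpre i j hiR hjrow (by omega))
  · rw [if_neg (fun hcon => hW hcon.1), if_neg (fun hcon => hW hcon.2.1)]
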